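-- pv_equiv track=rewrite | github.com/tannerjhuck/CSE_160 | midterm_22au.py | zombie_list
-- ===== SOURCE A (Python) =====
-- def zombie_list(initial_list, output_list, bunch_size):
--     # Creating list we will later return
--     final_list = initial_list[:]
--     # Calculating how many element we will add to the initial list
--     diff_length = output_list - len(initial_list)
--     # Loop that will run howevery many times we want to add
--     # a new element
--     for i in range(0, diff_length):
--         new_element = 0  # The new element we will add to the list
--         # Loop that will run through the last "bunch_size" elements
--         # and add them to the new element
--         for j in range(0, bunch_size):
--             new_element = new_element + final_list[-1 - j]
--         # Adding the new element to the final list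
--         final_list.append(new_element)
--     return(final_list)  # Returning the final list
-- ===== SOURCE B (Python) =====
-- def zombie_list(initial_list, output_list, bunch_size):
--     # Sliding-window running sum: each appended element reuses the previous
--     # window sum instead of re-summing the last bunch_size elements.
--     res = list(initial_list)
--     n = output_list - len(res)
--     if n <= 0:
--         return res
--     if bunch_size <= 0:
--         return res + [0] * n
--     w = sum(res[len(res) - bunch_size:])
--     for _ in range(n):
--         res.append(w)
--         w = 2 * w - res[len(res) - 1 - bunch_size]
--     return res
-- ===== Notes on version B (the rewrite author's own statement) =====
-- stated objective: alternative
-- what changed: Replaces A's inner loop that re-sums the last bunch_size elements for every appended element by a sliding-window running sum updated once per append (w = 2*w - element leaving the window).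
import Mathlib
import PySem

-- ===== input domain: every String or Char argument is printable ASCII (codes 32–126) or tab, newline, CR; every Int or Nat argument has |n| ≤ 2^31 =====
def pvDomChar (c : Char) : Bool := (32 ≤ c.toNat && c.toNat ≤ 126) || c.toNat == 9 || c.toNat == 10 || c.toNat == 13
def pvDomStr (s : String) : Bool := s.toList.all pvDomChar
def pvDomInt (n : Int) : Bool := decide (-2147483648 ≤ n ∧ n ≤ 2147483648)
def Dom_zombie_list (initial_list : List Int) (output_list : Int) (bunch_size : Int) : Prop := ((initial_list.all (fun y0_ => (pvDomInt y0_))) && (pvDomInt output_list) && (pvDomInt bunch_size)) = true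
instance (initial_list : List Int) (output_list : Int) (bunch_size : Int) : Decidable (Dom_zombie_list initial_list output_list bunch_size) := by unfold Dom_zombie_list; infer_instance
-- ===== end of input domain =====

-- B replaces A's inner re-summation of the last bunch_size elements by a sliding-window
-- running sum updated once per appended element (alternative algorithm).

-- ===== PORT A =====
-- Literal transliteration of A: outer loop over range(0, diff_length), inner loop over
-- range(0, bunch_size) summing final_list[-1-j] via pyGet?; the .getD 0 default is
-- unreachable inside Pre_ (where Python's indexing never raises).
def zombie_list (initial_list : List Int) (output_list : Int) (bunch_size : Int) : List Int :=
  let diff_length : Int := output_list - (initial_list.length : Int)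
  (PySem.List.pyRange 0 diff_length 1).foldl
    (fun final_list _ =>
      let new_element : Int :=
        (PySem.List.pyRange 0 bunch_size 1).foldl
          (fun acc j => acc + (PySem.List.pyGet? final_list (-1 - j)).getD 0) 0
      final_list ++ [new_element])
    initial_list

-- ===== PORT B =====
-- loop of Source B: append w, then update the running window sum w ← 2*w − res[len(res)-1-bunch_size]
def zlAltLoop (bunch_size : Int) : Nat → List Int → Int → List Int
  | 0, res, _ => res
  | n+1, res, w =>
    let res' := res ++ [w]
    zlAltLoop bunch_size n res'
      (2 * w - (PySem.List.pyGet? res' ((res'.length : Int) - 1 - bunch_size)).getD 0)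

def zombie_list_alt (initial_list : List Int) (output_list : Int) (bunch_size : Int) : List Int :=
  let n : Int := output_list - (initial_list.length : Int)
  if n ≤ 0 then initial_list
  else if bunch_size ≤ 0 then initial_list ++ List.replicate n.toNat 0
  else
    let w := (PySem.List.slice initial_list
                (some ((initial_list.length : Int) - bunch_size))
                (some (initial_list.length : Int))).foldl (· + ·) 0
    zlAltLoop bunch_size n.toNat initial_list w

-- ===== PRECONDITION & SPEC =====
-- Pre_ excludes exactly the inputs where A raises IndexError: elements must be appended
-- (diff_length > 0) while bunch_size exceeds the current list length.
def Pre_zombie_list (initial_list : List Int) (output_list : Int) (bunch_size : Int) : Prop :=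
  output_list - (initial_list.length : Int) ≤ 0 ∨ bunch_size ≤ (initial_list.length : Int)
instance (initial_list : List Int) (output_list : Int) (bunch_size : Int) : Decidable (Pre_zombie_list initial_list output_list bunch_size) := by unfold Pre_zombie_list; infer_instance

def pvWitness_zombie_list : List Int × Int × Int := ([1, 2], 5, 2)

def Spec_zombie_list (initial_list : List Int) (output_list : Int) (bunch_size : Int) (out : List Int) : Prop := out = zombie_list_alt initial_list output_list bunch_size
instance (initial_list : List Int) (output_list : Int) (bunch_size : Int) (out : List Int) : Decidable (Spec_zombie_list initial_list output_list bunch_size out) := by unfold Spec_zombie_list; infer_instance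

-- ===== CLAIM (what is proved, stated in full; the proofs are below) =====
def Claim_equal_zombie_list : Prop := ∀ (initial_list : List Int) (output_list : Int) (bunch_size : Int), Dom_zombie_list initial_list output_list bunch_size → Pre_zombie_list initial_list output_list bunch_size → Spec_zombie_list initial_list output_list bunch_size (zombie_list initial_list output_list bunch_size)

-- ===== LEMMAS AND PROOFS =====

-- sum of the last bs elements
def winSum (bs : Nat) (l : List Int) : Int := (l.drop (l.length - bs)).sum

-- n-fold iteration of a list transformer (front-first, like both loops)
def iterN (g : List Int -> List Int) : Nat -> List Int -> List Int
  | 0, l => l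
  | n+1, l => iterN g n (g l)

theorem foldl_ignore (g : List Int -> List Int) (L : List Int) (init : List Int) :
    L.foldl (fun fl _ => g fl) init = iterN g L.length init := by
  induction L generalizing init with
  | nil => rfl
  | cons x xs ih => simp [List.foldl, iterN, ih]

theorem foldl_add_sum (xs : List Int) (a : Int) : xs.foldl (· + ·) a = a + xs.sum := by
  induction xs generalizing a with
  | nil => simp
  | cons x xs ih => rw [List.foldl_cons, ih (a + x), List.sum_cons]; ring

theorem winSum_succ (l : List Int) (m : Nat) (h : m < l.length) :
    winSum (m + 1) l = l[l.length - (m + 1)]'(by omega) + winSum m l := by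
  unfold winSum
  rw [List.drop_eq_getElem_cons (i := l.length - (m + 1)) (l := l) (by omega), List.sum_cons]
  have e2 : l.length - (m + 1) + 1 = l.length - m := by omega
  rw [e2]

theorem innerAux (l : List Int) (m : Nat) (h : m ≤ l.length) :
    (List.range m).foldl (fun (acc : Int) (k : Nat) => acc + (PySem.List.pyGet? l (-1 - (k : Int))).getD 0) 0
      = winSum m l := by
  induction m with
  | zero => simp [winSum]
  | succ m ih =>
    rw [List.range_succ, List.foldl_append, ih (by omega)]
    simp only [List.foldl_cons, List.foldl_nil]
    have h1 : (-1 - (m : Int)) = -(((m + 1 : Nat)) : Int) := by push_cast; ring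
    rw [h1, PySem.List.pyGet?_neg_natCast l (m + 1) (by omega) (by omega)]
    rw [List.getElem?_eq_getElem (by omega), Option.getD_some]
    rw [winSum_succ l m (by omega)]
    ring

-- A's inner loop computes the last-bs window sum (when 0 < bs <= len)
theorem innerA (l : List Int) (bs : Int) (h1 : 0 < bs) (h2 : bs ≤ (l.length : Int)) :
    (PySem.List.pyRange 0 bs 1).foldl
        (fun acc j => acc + (PySem.List.pyGet? l (-1 - j)).getD 0) 0
      = winSum bs.toNat l := by
  rw [PySem.List.pyRange_one, List.foldl_map]
  simp only [zero_add, sub_zero]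
  exact innerAux l bs.toNat (by omega)

-- A's inner loop is 0 when bs <= 0
theorem innerA_nonpos (l : List Int) (bs : Int) (h : bs ≤ 0) :
    (PySem.List.pyRange 0 bs 1).foldl
        (fun acc j => acc + (PySem.List.pyGet? l (-1 - j)).getD 0) 0 = 0 := by
  rw [PySem.List.pyRange_one]
  have e : (bs - 0).toNat = 0 := by omega
  rw [e]; rfl

theorem winSum_append (res : List Int) (w : Int) (bsN : Nat) (h1 : 0 < bsN) (h2 : bsN ≤ res.length) :
    winSum bsN (res ++ [w]) = (res.drop (res.length + 1 - bsN)).sum + w := by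
  unfold winSum
  have e : (res ++ [w]).length - bsN = res.length + 1 - bsN := by simp
  rw [e, List.drop_append_of_le_length (by omega), List.sum_append, List.sum_cons, List.sum_nil]
  ring

theorem winSum_head (res : List Int) (bsN : Nat) (h1 : 0 < bsN) (h2 : bsN ≤ res.length) :
    winSum bsN res
      = res[res.length - bsN]'(by omega) + (res.drop (res.length + 1 - bsN)).sum := by
  unfold winSum
  rw [List.drop_eq_getElem_cons (i := res.length - bsN) (l := res) (by omega), List.sum_cons]
  have e : res.length - bsN + 1 = res.length + 1 - bsN := by omega
  rw [e]

theorem altLoopEq (bs : Int) (hbs : 0 < bs) (n : Nat) :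
    ∀ res : List Int, bs ≤ (res.length : Int) →
      zlAltLoop bs n res (winSum bs.toNat res)
        = iterN (fun fl => fl ++ [winSum bs.toNat fl]) n res := by
  induction n with
  | zero => intro res _; rfl
  | succ n ih =>
    intro res hlen
    have hb1 : 0 < bs.toNat := by omega
    have hb2 : bs.toNat ≤ res.length := by omega
    simp only [zlAltLoop, iterN]
    have hidx : ((res ++ [winSum bs.toNat res]).length : Int) - 1 - bs
        = ((res.length - bs.toNat : Nat) : Int) := by
      simp; omega
    have hget : (PySem.List.pyGet? (res ++ [winSum bs.toNat res])
        (((res ++ [winSum bs.toNat res]).length : Int) - 1 - bs)).getD 0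
        = res[res.length - bs.toNat]'(by omega) := by
      rw [hidx, PySem.List.pyGet?_natCast]
      rw [List.getElem?_append_left (by omega)]
      rw [List.getElem?_eq_getElem (by omega)]
      rfl
    have hupd : 2 * winSum bs.toNat res - res[res.length - bs.toNat]'(by omega)
        = winSum bs.toNat (res ++ [winSum bs.toNat res]) := by
      rw [winSum_append res (winSum bs.toNat res) bs.toNat hb1 hb2]
      have hh := winSum_head res bs.toNat hb1 hb2
      linarith [hh]
    rw [hget, hupd]
    exact ih (res ++ [winSum bs.toNat res]) (by simp; omega)

-- A's outer iteration equals the winSum iteration when 0 < bs <= len (length only grows)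
theorem iterA_eq (bs : Int) (hbs : 0 < bs) (n : Nat) :
    ∀ l : List Int, bs ≤ (l.length : Int) →
      iterN (fun fl => fl ++ [(PySem.List.pyRange 0 bs 1).foldl
          (fun acc j => acc + (PySem.List.pyGet? fl (-1 - j)).getD 0) 0]) n l
        = iterN (fun fl => fl ++ [winSum bs.toNat fl]) n l := by
  induction n with
  | zero => intro l _; rfl
  | succ n ih =>
    intro l hlen
    simp only [iterN]
    rw [innerA l bs hbs hlen]
    exact ih _ (by simp; omega)

-- A's outer iteration appends zeros when bs <= 0
theorem iterA_zero (bs : Int) (hbs : bs ≤ 0) (n : Nat) :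
    ∀ l : List Int,
      iterN (fun fl => fl ++ [(PySem.List.pyRange 0 bs 1).foldl
          (fun acc j => acc + (PySem.List.pyGet? fl (-1 - j)).getD 0) 0]) n l
        = l ++ List.replicate n 0 := by
  induction n with
  | zero => intro l; simp [iterN]
  | succ n ih =>
    intro l
    simp only [iterN]
    rw [innerA_nonpos l bs hbs, ih (l ++ [0])]
    simp [List.replicate_succ]

-- B's initial window sum is winSum
theorem initW (l : List Int) (bs : Int) (h1 : 0 < bs) (h2 : bs ≤ (l.length : Int)) :
    (PySem.List.slice l (some ((l.length : Int) - bs)) (some (l.length : Int))).foldl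
        (· + ·) 0 = winSum bs.toNat l := by
  rw [PySem.List.slice_toNat l (a := (l.length : Int) - bs) (b := (l.length : Int))
        (by omega) (by omega)]
  have h3 : ((l.length : Int) - bs).toNat = l.length - bs.toNat := by omega
  have h4 : (l.length : Int).toNat = l.length := by omega
  rw [h3, h4]
  have h5 : (l.drop (l.length - bs.toNat)).take (l.length - (l.length - bs.toNat))
      = l.drop (l.length - bs.toNat) := by
    apply List.take_of_length_le; simp
  rw [h5, foldl_add_sum, winSum]
  ring

-- ===== VERDICT (by name: the statement is the Claim_ definition above) =====
theorem zombie_list_spec : Claim_equal_zombie_list := by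
  intro init out bs _ hpre
  unfold Spec_zombie_list
  simp only [zombie_list, zombie_list_alt]
  rw [foldl_ignore, PySem.List.length_pyRange_one]
  by_cases hle : out - (init.length : Int) ≤ 0
  · have e : (out - (init.length : Int) - 0).toNat = 0 := by omega
    rw [e, if_pos hle]
    rfl
  · rw [if_neg hle]
    have e : (out - (init.length : Int) - 0).toNat = (out - (init.length : Int)).toNat := by omega
    rw [e]
    by_cases hbs : bs ≤ 0
    · rw [if_pos hbs]
      exact iterA_zero bs hbs _ init
    · rw [if_neg hbs]
      have hbspos : 0 < bs := by omega
      have hlen : bs ≤ (init.length : Int) := by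
        rcases hpre with h | h
        · omega
        · exact h
      rw [iterA_eq bs hbspos _ init hlen, initW init bs hbspos hlen,
          altLoopEq bs hbspos _ init hlen]
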